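-- pv_equiv track=rewrite | github.com/PumchProjects/iatreion | src/iatreion/show_helpers/common.py | _resolve_metrics
-- ===== SOURCE A (Python) =====
-- DEFAULT_BINARY_METRICS: list[str] = ['AUC', 'ACC', 'P', 'R', 'F1', 'SEN', 'SPC']
--
-- def _resolve_metrics(
--     metrics: list[str] | None, metric_dicts: list[dict[str, tuple[float, ...]]]
-- ) -> list[str]:
--     if metrics:
--         return metrics
--     merged = {key for metric_dict in metric_dicts for key in metric_dict}
--     ordered = [metric for metric in DEFAULT_BINARY_METRICS if metric in merged]
--     extras = sorted(merged.difference(ordered))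
--     return ordered + extras
-- ===== SOURCE B (Python) =====
-- DEFAULT_BINARY_METRICS: list[str] = ['AUC', 'ACC', 'P', 'R', 'F1', 'SEN', 'SPC']
--
-- _RANK = {metric: index for index, metric in enumerate(DEFAULT_BINARY_METRICS)}
--
--
-- def _resolve_metrics(metrics, metric_dicts):
--     if metrics:
--         return metrics
--     merged = {key for metric_dict in metric_dicts for key in metric_dict}
--     fallback = len(DEFAULT_BINARY_METRICS)
--     return sorted(merged, key=lambda k: (_RANK.get(k, fallback), k))
-- ===== Notes on version B (the rewrite author's own statement) =====
-- stated objective: simpler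
-- what changed: Replaces the filter-over-defaults / set-difference / sort / concatenate pipeline with a single sorted() over the merged key set using a composite key (rank-in-DEFAULT_BINARY_METRICS with sentinel len(DEFAULT_BINARY_METRICS), then the name).
import Mathlib
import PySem

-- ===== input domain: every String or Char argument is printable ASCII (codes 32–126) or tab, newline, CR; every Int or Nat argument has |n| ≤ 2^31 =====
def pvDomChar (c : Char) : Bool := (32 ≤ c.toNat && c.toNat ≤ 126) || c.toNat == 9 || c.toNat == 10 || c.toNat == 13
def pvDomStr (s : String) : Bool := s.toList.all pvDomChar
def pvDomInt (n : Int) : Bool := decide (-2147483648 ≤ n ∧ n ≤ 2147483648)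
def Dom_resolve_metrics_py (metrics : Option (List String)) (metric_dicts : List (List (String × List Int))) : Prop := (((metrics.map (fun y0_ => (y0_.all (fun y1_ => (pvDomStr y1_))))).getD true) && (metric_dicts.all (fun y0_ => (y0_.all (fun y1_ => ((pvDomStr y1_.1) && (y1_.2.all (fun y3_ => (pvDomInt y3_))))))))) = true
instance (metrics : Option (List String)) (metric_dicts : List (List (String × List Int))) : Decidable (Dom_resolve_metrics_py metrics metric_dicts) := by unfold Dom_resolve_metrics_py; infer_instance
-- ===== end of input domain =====

-- B replaces A's filter / set-difference / sort / concatenate pipeline by a single sort of the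
-- merged key set under the composite key (rank in DEFAULT_BINARY_METRICS with sentinel 7, name)
-- (objective: simpler; same asymptotic cost).

-- ===== PORT A =====
-- DEFAULT_BINARY_METRICS
def pvDefaults : List String := ["AUC", "ACC", "P", "R", "F1", "SEN", "SPC"]

-- merged = {key for metric_dict in metric_dicts for key in metric_dict}  (identical line in A and B)
def pvMerged (metric_dicts : List (List (String × List Int))) : PySem.Set String :=
  metric_dicts.foldl (fun s metric_dict => metric_dict.foldl (fun s kv => PySem.Set.add s kv.1) s) PySem.Set.empty

def pvABody (metric_dicts : List (List (String × List Int))) : List String :=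
  let merged := pvMerged metric_dicts
  let ordered := pvDefaults.filter (fun metric => PySem.Set.contains merged metric)
  let extras := PySem.List.sorted (PySem.Set.diff merged ordered) (fun x => x)
  ordered ++ extras

def resolve_metrics_py (metrics : Option (List String)) (metric_dicts : List (List (String × List Int))) : List String :=
  match metrics with
  | some ms => if ms.isEmpty then pvABody metric_dicts else ms
  | none => pvABody metric_dicts

-- ===== PORT B =====
-- _RANK = {metric: index for index, metric in enumerate(DEFAULT_BINARY_METRICS)}
def pvRankDict : PySem.Dict String Int :=
  (PySem.List.enumerate pvDefaults).foldl (fun d p => d.insert p.2 (p.1 : Int)) PySem.Dict.empty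

-- _RANK.get(k, fallback) with fallback = len(DEFAULT_BINARY_METRICS)
def pvRank (k : String) : Int := pvRankDict.getD k (pvDefaults.length : Int)

def pvBBody (metric_dicts : List (List (String × List Int))) : List String :=
  let merged := pvMerged metric_dicts
  PySem.List.sorted2 merged pvRank (fun k => k)

def resolve_metrics_py_alt (metrics : Option (List String)) (metric_dicts : List (List (String × List Int))) : List String :=
  match metrics with
  | some ms => if ms.isEmpty then pvBBody metric_dicts else ms
  | none => pvBBody metric_dicts

-- ===== PRECONDITION & SPEC =====
def Spec_resolve_metrics_py (metrics : Option (List String)) (metric_dicts : List (List (String × List Int))) (out : List String) : Prop := out = resolve_metrics_py_alt metrics metric_dicts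
instance (metrics : Option (List String)) (metric_dicts : List (List (String × List Int))) (out : List String) : Decidable (Spec_resolve_metrics_py metrics metric_dicts out) := by unfold Spec_resolve_metrics_py; infer_instance

-- ===== CLAIM (what is proved, stated in full; the proofs are below) =====
def Claim_equal_resolve_metrics_py : Prop := ∀ (metrics : Option (List String)) (metric_dicts : List (List (String × List Int))), Dom_resolve_metrics_py metrics metric_dicts → Spec_resolve_metrics_py metrics metric_dicts (resolve_metrics_py metrics metric_dicts)

-- ===== LEMMAS AND PROOFS =====

-- The comparison sorted2 uses on B's composite key, written out.
def pvBefore (a b : String) : Bool :=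
  decide (pvRank a < pvRank b) || (!decide (pvRank b < pvRank a) && decide (a < b))

theorem pvBefore_iff (a b : String) :
    pvBefore a b = true ↔ (pvRank a < pvRank b ∨ (¬ pvRank b < pvRank a ∧ a < b)) := by
  simp [pvBefore]

theorem pvBefore_asymm (a b : String) (h : pvBefore a b = true) : pvBefore b a = false := by
  rw [pvBefore_iff] at h
  rw [Bool.eq_false_iff, Ne, pvBefore_iff]
  rintro (h' | ⟨h1', h2'⟩)
  · rcases h with h | ⟨h1, _⟩
    · exact lt_asymm h h'
    · exact h1 h'
  · rcases h with h | ⟨_, h2⟩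
    · exact h1' h
    · exact lt_asymm h2 h2'

theorem pvBefore_trans (a b c : String) (hab : pvBefore a b = true) (hbc : pvBefore b c = true) :
    pvBefore a c = true := by
  rw [pvBefore_iff] at hab hbc ⊢
  rcases hab with h | ⟨h1, h2⟩ <;> rcases hbc with h' | ⟨h1', h2'⟩
  · exact Or.inl (lt_trans h h')
  · exact Or.inl (lt_of_lt_of_le h (not_lt.1 h1'))
  · exact Or.inl (lt_of_le_of_lt (not_lt.1 h1) h')
  · exact Or.inr ⟨fun hca => not_lt.2 (le_trans (not_lt.1 h1) (not_lt.1 h1')) hca,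
      lt_trans h2 h2'⟩

theorem pvBefore_total (a b : String) (h : pvBefore a b = false) (h' : pvBefore b a = false) :
    a = b := by
  rw [Bool.eq_false_iff, Ne, pvBefore_iff] at h h'
  by_contra hne
  rcases lt_trichotomy (pvRank a) (pvRank b) with hr | hr | hr
  · exact h (Or.inl hr)
  · rcases lt_trichotomy a b with hs | hs | hs
    · exact h (Or.inr ⟨fun hc => by rw [hr] at hc; exact lt_irrefl _ hc, hs⟩)
    · exact hne hs
    · exact h' (Or.inr ⟨fun hc => by rw [hr] at hc; exact lt_irrefl _ hc, hs⟩)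
  · exact h' (Or.inl hr)

theorem pvInsert_pairwise (x : String) (ys : List String)
    (h : ys.Pairwise (fun a b => pvBefore b a = false)) :
    (PySem.List.insertBy pvBefore x ys).Pairwise (fun a b => pvBefore b a = false) := by
  induction ys with
  | nil => simp [PySem.List.insertBy]
  | cons y ys ih =>
    rw [List.pairwise_cons] at h
    show (if pvBefore x y = true then x :: y :: ys else y :: PySem.List.insertBy pvBefore x ys).Pairwise _
    by_cases hxy : pvBefore x y = true
    · simp only [hxy, if_true]
      refine List.Pairwise.cons ?_ (List.Pairwise.cons h.1 h.2)
      intro z hz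
      rcases List.mem_cons.1 hz with rfl | hz
      · exact pvBefore_asymm x z hxy
      · by_contra hc
        have hzx : pvBefore z x = true := by
          cases hzx : pvBefore z x
          · exact absurd hzx hc
          · rfl
        have := pvBefore_trans z x y hzx hxy
        rw [h.1 z hz] at this
        exact Bool.false_ne_true this
    · simp only [hxy]
      refine List.Pairwise.cons ?_ (ih h.2)
      intro z hz
      rcases (PySem.List.mem_insertBy pvBefore x z ys).1 hz with rfl | hz
      · exact Bool.eq_false_iff.2 hxy
      · exact h.1 z hz

theorem pvFold_pairwise (xs acc : List String)
    (hacc : acc.Pairwise (fun a b => pvBefore b a = false)) :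
    (xs.foldl (fun acc x => PySem.List.insertBy pvBefore x acc) acc).Pairwise
      (fun a b => pvBefore b a = false) := by
  induction xs generalizing acc with
  | nil => exact hacc
  | cons x xs ih => exact ih _ (pvInsert_pairwise x acc hacc)

-- Any strictly pvBefore-increasing rearrangement of xs IS sorted2 xs pvRank id.
theorem pvSorted2_eq (xs ys : List String) (hperm : ys.Perm xs)
    (hp : ys.Pairwise (fun a b => pvBefore a b = true)) :
    PySem.List.sorted2 xs pvRank (fun k => k) = ys := by
  have h1 : (PySem.List.sorted2 xs pvRank (fun k => k)).Perm xs :=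
    PySem.List.sorted2_perm xs pvRank (fun k => k) false
  have h2 : (PySem.List.sorted2 xs pvRank (fun k => k)).Pairwise
      (fun a b => pvBefore b a = false) := by
    show (xs.foldl (fun acc x => PySem.List.insertBy _ x acc) []).Pairwise _
    exact pvFold_pairwise xs [] (by simp)
  have h3 : ys.Pairwise (fun a b => pvBefore b a = false) :=
    hp.imp (fun hab => pvBefore_asymm _ _ hab)
  exact List.Perm.eq_of_pairwise
    (fun a b _ _ h h' => pvBefore_total a b h' h) h2 h3 (h1.trans hperm.symm)

theorem pvRankDict_items : pvRankDict = PySem.Dict.mk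
    [("AUC", 0), ("ACC", 1), ("P", 2), ("R", 3), ("F1", 4), ("SEN", 5), ("SPC", 6)] := by
  rfl

theorem pvRank_lt (a : String) (h : a ∈ pvDefaults) : pvRank a < 7 := by
  simp only [pvDefaults, List.mem_cons, List.not_mem_nil, or_false] at h
  rcases h with rfl | rfl | rfl | rfl | rfl | rfl | rfl <;> decide

theorem pvRank_eq_seven (a : String) (h : a ∉ pvDefaults) : pvRank a = 7 := by
  simp only [pvDefaults, List.mem_cons, List.not_mem_nil, or_false, not_or] at h
  obtain ⟨h1, h2, h3, h4, h5, h6, h7⟩ := h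
  have e : ∀ s : String, ¬ a = s → (s == a) = false :=
    fun s hs => beq_eq_false_iff_ne.2 (fun hc => hs hc.symm)
  simp [pvRank, pvRankDict_items, pvDefaults, PySem.Dict.getD, PySem.Dict.get?, List.find?,
    e _ h1, e _ h2, e _ h3, e _ h4, e _ h5, e _ h6, e _ h7]

theorem pvMergedInner_nodup (d : List (String × List Int)) (s : PySem.Set String)
    (hs : s.Nodup) : (d.foldl (fun s kv => PySem.Set.add s kv.1) s).Nodup := by
  induction d generalizing s with
  | nil => exact hs
  | cons kv d ih => exact ih _ (PySem.Set.nodup_add s kv.1 hs)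

theorem pvMerged_nodup_aux (md : List (List (String × List Int))) (s : PySem.Set String)
    (hs : s.Nodup) :
    (md.foldl (fun s metric_dict => metric_dict.foldl (fun s kv => PySem.Set.add s kv.1) s) s).Nodup := by
  induction md generalizing s with
  | nil => exact hs
  | cons d md ih => exact ih _ (pvMergedInner_nodup d s hs)

theorem pvMerged_nodup (md : List (List (String × List Int))) : (pvMerged md).Nodup :=
  pvMerged_nodup_aux md PySem.Set.empty List.nodup_nil

theorem pvDefaults_pairwise : pvDefaults.Pairwise (fun a b => pvBefore a b = true) := by
  decide

theorem pvBody_eq (md : List (List (String × List Int))) : pvABody md = pvBBody md := by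
  unfold pvABody pvBBody
  set m := pvMerged md with hm
  have hmnd : m.Nodup := pvMerged_nodup md
  set ordered := pvDefaults.filter (fun metric => PySem.Set.contains m metric) with hord
  set extras := PySem.List.sorted (PySem.Set.diff m ordered) (fun x => x) with hext
  -- memberships
  have hordered_mem : ∀ a, a ∈ ordered ↔ a ∈ pvDefaults ∧ a ∈ m := by
    intro a
    simp [hord, List.mem_filter]
  have hextras_mem : ∀ a, a ∈ extras ↔ a ∈ m ∧ a ∉ ordered := by
    intro a
    rw [hext, PySem.List.mem_sorted, PySem.Set.mem_diff]
  have hextras_not_def : ∀ a, a ∈ extras → a ∉ pvDefaults := by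
    intro a ha hd
    have := (hextras_mem a).1 ha
    exact this.2 ((hordered_mem a).2 ⟨hd, this.1⟩)
  -- nodup
  have hordnd : ordered.Nodup := (by decide : pvDefaults.Nodup).filter _
  have hextnd : extras.Nodup :=
    ((PySem.List.sorted_perm (PySem.Set.diff m ordered) (fun x => x) false).nodup_iff).2
      (PySem.Set.nodup_diff m ordered hmnd)
  -- permutation
  have hperm : (ordered ++ extras).Perm m := by
    rw [List.perm_ext_iff_of_nodup
      (hordnd.append hextnd (fun a ha ha' => ((hextras_mem a).1 ha').2 ha)) hmnd]
    intro a
    constructor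
    · intro h
      rcases List.mem_append.1 h with h | h
      · exact ((hordered_mem a).1 h).2
      · exact ((hextras_mem a).1 h).1
    · intro h
      by_cases ho : a ∈ ordered
      · exact List.mem_append.2 (Or.inl ho)
      · exact List.mem_append.2 (Or.inr ((hextras_mem a).2 ⟨h, ho⟩))
  -- pairwise strictly before
  have hpair : (ordered ++ extras).Pairwise (fun a b => pvBefore a b = true) := by
    rw [List.pairwise_append]
    refine ⟨pvDefaults_pairwise.filter _, ?_, ?_⟩
    · -- inside extras: equal rank 7, strictly increasing names
      have hle : extras.Pairwise (fun a b : String => a ≤ b) := by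
        rw [hext]; exact PySem.List.sorted_pairwise _ _
      have hlt : extras.Pairwise (fun a b : String => a < b) :=
        (hle.and hextnd).imp (fun h => lt_of_le_of_ne h.1 h.2)
      refine List.Pairwise.imp_of_mem ?_ hlt
      intro a b ha hb hab
      simp only [pvBefore, pvRank_eq_seven a (hextras_not_def a ha),
        pvRank_eq_seven b (hextras_not_def b hb)]
      simp [hab]
    · -- ordered before extras: rank < 7 vs rank = 7
      intro a ha b hb
      have h7 : pvRank a < pvRank b := by
        rw [pvRank_eq_seven b (hextras_not_def b hb)]
        exact pvRank_lt a ((hordered_mem a).1 ha).1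
      simp [pvBefore, h7]
  exact (pvSorted2_eq m (ordered ++ extras) hperm hpair).symm

-- ===== VERDICT (by name: the statement is the Claim_ definition above) =====
theorem resolve_metrics_py_spec : Claim_equal_resolve_metrics_py := by
  intro metrics metric_dicts _
  unfold Spec_resolve_metrics_py resolve_metrics_py resolve_metrics_py_alt
  cases metrics with
  | none => exact pvBody_eq metric_dicts
  | some ms =>
    cases h : ms.isEmpty <;> simp [h, pvBody_eq metric_dicts]
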